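-- pv_equiv track=rewrite | github.com/wolfmanstout/wolfmanstout_talon | core/text/text_and_dictation.py | _split_outer_guards
-- ===== SOURCE A (Python) =====
-- import unicodedata
--
-- def _is_outer_guard(char: str) -> bool:
--     return char.isspace() or unicodedata.category(char).startswith("P")
--
-- def _split_outer_guards(text: str) -> tuple[str, str, str]:
--     left = 0
--     right = len(text)
--     while left < right and _is_outer_guard(text[left]):
--         left += 1
--     while right > left and _is_outer_guard(text[right - 1]):
--         right -= 1
--     return text[:left], text[left:right], text[right:]
-- ===== SOURCE B (Python) =====
-- import unicodedata
--
-- def _is_outer_guard(char: str) -> bool: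
--     return char.isspace() or unicodedata.category(char).startswith("P")
--
-- def _split_outer_guards(text: str) -> tuple[str, str, str]:
--     first = None
--     last = None
--     for i, char in enumerate(text):
--         if not _is_outer_guard(char):
--             if first is None:
--                 first = i
--             last = i
--     if first is None:
--         left = right = len(text)
--     else:
--         left = first
--         right = last + 1
--     return text[:left], text[left:right], text[right:]
-- ===== Notes on version B (the rewrite author's own statement) =====
-- stated objective: alternative
-- what changed: A trims with two index-based while loops (one from each end); B makes a single forward enumerate pass recording the first and last non-guard indices and slices once, with the all-guard/empty case mapping to (text, '', '').
import Mathlib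
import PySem

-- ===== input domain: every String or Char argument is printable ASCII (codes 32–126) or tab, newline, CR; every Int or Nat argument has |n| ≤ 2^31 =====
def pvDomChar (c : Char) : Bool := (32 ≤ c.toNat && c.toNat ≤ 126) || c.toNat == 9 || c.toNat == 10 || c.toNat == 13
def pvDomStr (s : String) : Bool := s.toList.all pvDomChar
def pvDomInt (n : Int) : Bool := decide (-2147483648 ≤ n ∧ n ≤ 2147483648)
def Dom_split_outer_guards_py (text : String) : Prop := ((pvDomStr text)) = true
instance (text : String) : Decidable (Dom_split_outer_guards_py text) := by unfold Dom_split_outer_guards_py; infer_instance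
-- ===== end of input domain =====

-- B replaces A's two index-based while loops by a single forward enumerate pass that records the
-- first and last non-guard indices (objective: alternative decomposition, same O(n) cost).


-- ===== PORT A =====
-- _is_outer_guard: char.isspace() is PySem.Chars.isspace; unicodedata.category(char).startswith("P")
-- is ported as membership in the explicit set of ASCII characters of category P* — exact on the
-- stated domain (printable ASCII plus tab/newline/CR).
def pyIsOuterGuard (c : Char) : Bool :=
  PySem.Chars.isspace c || ("!\"#%&'()*,-./:;?@[\\]_{}".toList.contains c)

-- 'while left < right and _is_outer_guard(text[left]): left += 1'
def pvALeftLoop (cs : List Char) (left right : Nat) : Nat :=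
  if h : left < right ∧ pyIsOuterGuard (PySem.List.pyGetD cs (left : Int) ' ') = true then
    pvALeftLoop cs (left + 1) right
  else left
termination_by right - left
decreasing_by omega

-- 'while right > left and _is_outer_guard(text[right - 1]): right -= 1'
def pvARightLoop (cs : List Char) (left right : Nat) : Nat :=
  if h : left < right ∧ pyIsOuterGuard (PySem.List.pyGetD cs ((right : Int) - 1) ' ') = true then
    pvARightLoop cs left (right - 1)
  else right
termination_by right
decreasing_by omega

def split_outer_guards_py (text : String) : String × String × String :=
  let cs := text.toList
  let left := pvALeftLoop cs 0 cs.length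
  let right := pvARightLoop cs left cs.length
  (String.ofList (PySem.List.slice cs none (some (left : Int))),
   String.ofList (PySem.List.slice cs (some (left : Int)) (some (right : Int))),
   String.ofList (PySem.List.slice cs (some (right : Int)) none))

-- ===== PORT B =====
-- 'for i, char in enumerate(text): if not _is_outer_guard(char): first = first if first is not None else i; last = i'
def pvBScan (i : Nat) (first last : Option Nat) : List Char → Option Nat × Option Nat
  | [] => (first, last)
  | c :: t =>
    if pyIsOuterGuard c then pvBScan (i + 1) first last t
    else pvBScan (i + 1) (some (first.getD i)) (some i) t

def split_outer_guards_py_alt (text : String) : String × String × String :=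
  let cs := text.toList
  let fl := pvBScan 0 none none cs
  let lr : Nat × Nat :=
    match fl with
    | (some f, some l) => (f, l + 1)
    | _ => (cs.length, cs.length)
  (String.ofList (PySem.List.slice cs none (some (lr.1 : Int))),
   String.ofList (PySem.List.slice cs (some (lr.1 : Int)) (some (lr.2 : Int))),
   String.ofList (PySem.List.slice cs (some (lr.2 : Int)) none))

-- ===== PRECONDITION & SPEC =====
def Spec_split_outer_guards_py (text : String) (out : String × String × String) : Prop := out = split_outer_guards_py_alt text
instance (text : String) (out : String × String × String) : Decidable (Spec_split_outer_guards_py text out) := by unfold Spec_split_outer_guards_py; infer_instance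

-- ===== CLAIM (what is proved, stated in full; the proofs are below) =====
def Claim_equal_split_outer_guards_py : Prop := ∀ (text : String), Dom_split_outer_guards_py text → Spec_split_outer_guards_py text (split_outer_guards_py text)

-- ===== LEMMAS AND PROOFS =====

-- characters inside the takeWhile prefix satisfy the predicate
theorem pvTwElem (p : Char → Bool) (l : List Char) (i : Nat)
    (h : i < (l.takeWhile p).length) (h2 : i < l.length) : p l[i] = true := by
  have he := (List.takeWhile_prefix (l := l) (p := p)).getElem (i := i) h
  have hm : (l.takeWhile p)[i]'h ∈ l.takeWhile p := List.getElem_mem h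
  rw [he] at hm
  exact List.mem_takeWhile_imp hm

-- the character right after the takeWhile prefix fails the predicate
theorem pvTwStop (p : Char → Bool) (l : List Char)
    (h : (l.takeWhile p).length < l.length) : p (l[(l.takeWhile p).length]'h) = false := by
  induction l with
  | nil => simp at h
  | cons c t ih =>
    by_cases hc : p c = true
    · have hlen : ((c :: t).takeWhile p).length = (t.takeWhile p).length + 1 := by
        simp [hc]
      have h' : (t.takeWhile p).length < t.length := by
        simp [hlen] at h; omega
      have := ih h'
      simp only [hlen, List.getElem_cons_succ]
      exact this
    · have hlen : ((c :: t).takeWhile p).length = 0 := by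
        simp [hc]
      simp only [hlen, List.getElem_cons_zero]
      simpa using hc

theorem pvTwLen (p : Char → Bool) (l : List Char) (h : l.all p = true) :
    (l.takeWhile p).length = l.length := by
  rw [List.takeWhile_eq_self_iff.mpr (by simpa [List.all_eq_true] using h)]

theorem pvTwLt (p : Char → Bool) (l : List Char) (h : ¬ l.all p = true) :
    (l.takeWhile p).length < l.length := by
  rcases Nat.lt_or_ge (l.takeWhile p).length l.length with hlt | hge
  · exact hlt
  · exfalso
    have hle := (List.takeWhile_prefix (l := l) (p := p)).length_le
    have heq : l.takeWhile p = l :=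
      (List.takeWhile_prefix (l := l) (p := p)).eq_of_length (by omega)
    exact h (List.all_eq_true.mpr (fun x hx => List.mem_takeWhile_imp (heq ▸ hx)))

-- ---- port A, left loop: it computes the length of the guard prefix ----
theorem pvALeftLoop_eq (suf pre : List Char) :
    pvALeftLoop (pre ++ suf) pre.length (pre ++ suf).length
      = pre.length + (suf.takeWhile pyIsOuterGuard).length := by
  induction suf generalizing pre with
  | nil =>
    rw [pvALeftLoop]
    simp
  | cons c t ih =>
    rw [pvALeftLoop]
    have hget : PySem.List.pyGetD (pre ++ c :: t) ((pre.length : Nat) : Int) ' ' = c := by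
      simp [PySem.List.pyGetD_natCast]
    by_cases hc : pyIsOuterGuard c = true
    · have hlen : pre.length < (pre ++ c :: t).length := by simp
      rw [dif_pos ⟨hlen, by rw [hget]; exact hc⟩]
      have h2 := ih (pre ++ [c])
      simp only [List.append_assoc, List.singleton_append, List.length_append,
        List.length_cons, List.length_nil, Nat.zero_add, List.takeWhile_cons, hc, if_true] at h2 ⊢
      omega
    · rw [dif_neg (by rw [hget]; tauto)]
      rw [List.takeWhile_cons, if_neg hc]
      simp

-- ---- port A, right loop: it strips m trailing guards down to a stopping point r ----
theorem pvARightLoop_run (m : Nat) (cs : List Char) (left r : Nat)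
    (hstop : ¬ (left < r ∧ pyIsOuterGuard (PySem.List.pyGetD cs ((r : Int) - 1) ' ') = true))
    (hguard : ∀ j, r ≤ j → j < r + m → pyIsOuterGuard (cs.getD j ' ') = true)
    (hlr : left ≤ r) :
    pvARightLoop cs left (r + m) = r := by
  induction m with
  | zero =>
    simp only [Nat.add_zero]
    rw [pvARightLoop, dif_neg hstop]
  | succ m ih =>
    rw [pvARightLoop]
    have hidx : (((r + (m + 1) : Nat)) : Int) - 1 = ((r + m : Nat) : Int) := by omega
    rw [dif_pos]
    · have he : r + (m + 1) - 1 = r + m := by omega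
      rw [he]
      exact ih (fun j h1 h2 => hguard j h1 (by omega))
    · refine ⟨by omega, ?_⟩
      rw [hidx, PySem.List.pyGetD_natCast]
      exact hguard (r + m) (by omega) (by omega)

-- ===== assembled characterizations =====

theorem pvA_left (cs : List Char) :
    pvALeftLoop cs 0 cs.length = (cs.takeWhile pyIsOuterGuard).length := by
  simpa using pvALeftLoop_eq cs []

theorem pvA_right_all (cs : List Char) (h : cs.all pyIsOuterGuard = true) :
    pvARightLoop cs (cs.takeWhile pyIsOuterGuard).length cs.length = cs.length := by
  rw [pvARightLoop, dif_neg]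
  rw [pvTwLen _ _ h]
  simp

theorem pvA_right_not_all (cs : List Char) (h : ¬ cs.all pyIsOuterGuard = true) :
    pvARightLoop cs (cs.takeWhile pyIsOuterGuard).length cs.length
      = cs.length - (cs.reverse.takeWhile pyIsOuterGuard).length := by
  set n := cs.length with hn
  set t := (cs.reverse.takeWhile pyIsOuterGuard).length with ht
  set ℓ := (cs.takeWhile pyIsOuterGuard).length with hl
  have hrev_not_all : ¬ cs.reverse.all pyIsOuterGuard = true := by
    simpa [List.all_reverse] using h
  have htn : t < n := by
    have := pvTwLt pyIsOuterGuard cs.reverse hrev_not_all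
    simpa using this
  have hln : ℓ < n := pvTwLt pyIsOuterGuard cs h
  -- every index in [n - t, n) holds a guard character
  have hguard : ∀ j, n - t ≤ j → j < n → pyIsOuterGuard (cs.getD j ' ') = true := by
    intro j h1 h2
    have hrl : cs.reverse.length = n := by simp [hn]
    have hj2 : n - 1 - j < cs.reverse.length := by omega
    have hrget : cs.reverse[n - 1 - j]'hj2 = cs[j]'h2 := by
      rw [List.getElem_reverse]
      congr 1
      omega
    have := pvTwElem pyIsOuterGuard cs.reverse (n - 1 - j) (by omega) hj2
    rw [hrget] at this
    rwa [List.getD_eq_getElem cs ' ' h2]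
  -- the character at n - t - 1 is not a guard
  have hstopchar : pyIsOuterGuard (cs[n - t - 1]'(by omega)) = false := by
    have hrl : cs.reverse.length = n := by simp [hn]
    have hs := pvTwStop pyIsOuterGuard cs.reverse (by omega)
    have hrget : cs.reverse[(cs.reverse.takeWhile pyIsOuterGuard).length]'(by omega)
        = cs[n - t - 1]'(by omega) := by
      rw [List.getElem_reverse]
      congr 1
      omega
    rwa [hrget] at hs
  -- ℓ < n - t: the character at ℓ is not a guard, but [n - t, n) are all guards
  have hlnt : ℓ < n - t := by
    by_contra hcon
    have h1 : n - t ≤ ℓ := by omega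
    have hg := hguard ℓ h1 hln
    rw [List.getD_eq_getElem cs ' ' hln] at hg
    rw [pvTwStop pyIsOuterGuard cs hln] at hg
    exact Bool.false_ne_true hg
  have hstop : ¬ (ℓ < n - t ∧ pyIsOuterGuard (PySem.List.pyGetD cs (((n - t : Nat) : Int) - 1) ' ') = true) := by
    rintro ⟨h1, h2⟩
    have hidx : ((n - t : Nat) : Int) - 1 = ((n - t - 1 : Nat) : Int) := by omega
    rw [hidx, PySem.List.pyGetD_natCast, List.getD_eq_getElem cs ' ' (by omega)] at h2
    rw [hstopchar] at h2
    exact Bool.false_ne_true h2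
  have hmain := pvARightLoop_run t cs ℓ (n - t) hstop
    (fun j h1 h2 => hguard j h1 (by omega)) (by omega)
  have hsum : n - t + t = n := by omega
  rwa [hsum] at hmain

-- ---- port B: the scan computes the first / last non-guard indices ----
theorem pvBScan_first_some (cs : List Char) (i f : Nat) (l : Option Nat) :
    (pvBScan i (some f) l cs).1 = some f := by
  induction cs generalizing i l with
  | nil => rfl
  | cons c t ih =>
    rw [pvBScan]
    by_cases hc : pyIsOuterGuard c = true
    · rw [if_pos hc]; exact ih _ _
    · rw [if_neg hc]; exact ih _ _

theorem pvBScan_first_none (cs : List Char) (i : Nat) (l : Option Nat) :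
    (pvBScan i none l cs).1
      = if cs.all pyIsOuterGuard = true then none
        else some (i + (cs.takeWhile pyIsOuterGuard).length) := by
  induction cs generalizing i l with
  | nil => simp [pvBScan]
  | cons c t ih =>
    rw [pvBScan]
    by_cases hc : pyIsOuterGuard c = true
    · rw [if_pos hc, ih]
      have hall : (c :: t).all pyIsOuterGuard = t.all pyIsOuterGuard := by simp [hc]
      by_cases ht : t.all pyIsOuterGuard = true
      · rw [if_pos ht, if_pos (by rw [hall]; exact ht)]
      · rw [if_neg ht, if_neg (by rw [hall]; exact ht)]
        rw [List.takeWhile_cons, if_pos hc]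
        simp only [List.length_cons]
        congr 1
        omega
    · rw [if_neg hc, pvBScan_first_some]
      rw [if_neg (by simp [hc])]
      rw [List.takeWhile_cons, if_neg hc]
      simp [Option.getD]

theorem pvBScan_last (cs : List Char) (i : Nat) (f l : Option Nat) :
    (pvBScan i f l cs).2
      = if cs.all pyIsOuterGuard = true then l
        else some (i + (cs.length - 1 - (cs.reverse.takeWhile pyIsOuterGuard).length)) := by
  induction cs generalizing i f l with
  | nil => simp [pvBScan]
  | cons c t ih =>
    have hrev : (c :: t).reverse = t.reverse ++ [c] := by simp
    rw [pvBScan]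
    by_cases hc : pyIsOuterGuard c = true
    · rw [if_pos hc, ih]
      have hall : (c :: t).all pyIsOuterGuard = t.all pyIsOuterGuard := by simp [hc]
      by_cases ht : t.all pyIsOuterGuard = true
      · rw [if_pos ht, if_pos (by rw [hall]; exact ht)]
      · have hrt_not : ¬ t.reverse.all pyIsOuterGuard = true := by
          simpa [List.all_reverse] using ht
        have hrlt : (t.reverse.takeWhile pyIsOuterGuard).length < t.length := by
          have := pvTwLt pyIsOuterGuard t.reverse hrt_not
          simpa using this
        have hcond : ¬ ((t.reverse.takeWhile pyIsOuterGuard).length = t.reverse.length) := by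
          rw [List.length_reverse]; omega
        rw [if_neg ht, if_neg (by rw [hall]; exact ht)]
        rw [hrev, List.takeWhile_append, if_neg hcond]
        simp only [List.length_cons]
        congr 1
        omega
    · rw [if_neg hc, ih]
      have hallc : ¬ ((c :: t).all pyIsOuterGuard = true) := by simp [hc]
      by_cases ht : t.all pyIsOuterGuard = true
      · rw [if_pos ht, if_neg hallc]
        have hfull : t.reverse.takeWhile pyIsOuterGuard = t.reverse := by
          apply List.takeWhile_eq_self_iff.mpr
          intro x hx
          exact (List.all_eq_true.mp ht) x (by simpa using hx)
        have hone : List.takeWhile pyIsOuterGuard [c] = [] := by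
          simp [hc]
        rw [hrev, List.takeWhile_append, if_pos (by rw [hfull]), hone]
        simp
      · have hrt_not : ¬ t.reverse.all pyIsOuterGuard = true := by
          simpa [List.all_reverse] using ht
        have hrlt : (t.reverse.takeWhile pyIsOuterGuard).length < t.length := by
          have := pvTwLt pyIsOuterGuard t.reverse hrt_not
          simpa using this
        have hcond : ¬ ((t.reverse.takeWhile pyIsOuterGuard).length = t.reverse.length) := by
          rw [List.length_reverse]; omega
        rw [if_neg ht, if_neg hallc]
        rw [hrev, List.takeWhile_append, if_neg hcond]
        simp only [List.length_cons]
        congr 1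
        omega

-- ===== VERDICT (by name: the statement is the Claim_ definition above) =====
theorem split_outer_guards_py_spec : Claim_equal_split_outer_guards_py := by
  intro text _
  unfold Spec_split_outer_guards_py split_outer_guards_py split_outer_guards_py_alt
  set cs := text.toList with hcs
  by_cases hall : cs.all pyIsOuterGuard = true
  · have hfirst := pvBScan_first_none cs 0 none
    have hlast := pvBScan_last cs 0 none none
    rw [if_pos hall] at hfirst hlast
    have hfl : pvBScan 0 none none cs = (none, none) := by
      cases hb : pvBScan 0 none none cs with
      | mk a b => rw [hb] at hfirst hlast; simp at hfirst hlast; simp [hfirst, hlast]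
    have hl : pvALeftLoop cs 0 cs.length = cs.length := by
      rw [pvA_left, pvTwLen _ _ hall]
    have hr : pvARightLoop cs cs.length cs.length = cs.length := by
      have := pvA_right_all cs hall
      rwa [pvTwLen _ _ hall] at this
    simp only [hfl, hl, hr]
  · have hfirst := pvBScan_first_none cs 0 none
    have hlast := pvBScan_last cs 0 none none
    rw [if_neg hall] at hfirst hlast
    set n := cs.length with hn
    set t := (cs.reverse.takeWhile pyIsOuterGuard).length with ht
    set ℓ := (cs.takeWhile pyIsOuterGuard).length with hldef
    have hrev_not_all : ¬ cs.reverse.all pyIsOuterGuard = true := by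
      simpa [List.all_reverse] using hall
    have htn : t < n := by
      have := pvTwLt pyIsOuterGuard cs.reverse hrev_not_all
      simpa using this
    have hfl : pvBScan 0 none none cs = (some ℓ, some (n - 1 - t)) := by
      cases hb : pvBScan 0 none none cs with
      | mk a b =>
        rw [hb] at hfirst hlast
        simp at hfirst hlast
        simp [hfirst, hlast]
    have hl : pvALeftLoop cs 0 cs.length = ℓ := pvA_left cs
    have hr : pvARightLoop cs ℓ cs.length = n - t := pvA_right_not_all cs hall
    have hsucc : n - 1 - t + 1 = n - t := by omega
    simp only [hfl, hl, hr, hsucc]
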